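-- pv_equiv track=rewrite | github.com/Heir-of-God/Project-S | HackerRank/PreparationKits/3months/Week2/8 mars_exploration.py | marsExploration
-- ===== SOURCE A (Python) =====
-- def marsExploration(s) -> int:
--     sos = "SOS"
--     cur_ind = 0
--     res = 0
--
--     for char in s:
--         if sos[cur_ind] != char:
--             res += 1
--         cur_ind += 1
--         if cur_ind == len(sos):
--             cur_ind = 0
--
--     return res
-- ===== SOURCE B (Python) =====
-- def marsExploration(s) -> int:
--     total = 0
--     for i in range(0, len(s), 3):
--         chunk = s[i:i+3]
--         total += sum(1 for a, b in zip("SOS", chunk) if a != b)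
--     return total
-- ===== Notes on version B (the rewrite author's own statement) =====
-- stated objective: alternative
-- what changed: Replaces the per-character loop with a cycling index into "SOS" by a block-wise scan: fixed-size 3-character slices taken with range(0, len(s), 3) are each zipped against the literal "SOS" and mismatches summed, so no cycling state is maintained.
import Mathlib
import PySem

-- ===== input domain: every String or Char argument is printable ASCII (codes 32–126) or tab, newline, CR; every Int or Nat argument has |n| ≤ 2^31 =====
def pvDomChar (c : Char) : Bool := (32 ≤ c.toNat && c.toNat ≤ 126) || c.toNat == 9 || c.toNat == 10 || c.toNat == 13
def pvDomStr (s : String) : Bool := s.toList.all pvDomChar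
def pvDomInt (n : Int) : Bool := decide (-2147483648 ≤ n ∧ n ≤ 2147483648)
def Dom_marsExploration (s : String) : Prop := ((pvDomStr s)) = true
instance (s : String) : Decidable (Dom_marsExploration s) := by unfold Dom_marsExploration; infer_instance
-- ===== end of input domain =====

-- B replaces A's per-character loop with its cycling index by a block-wise scan in windows of 3
-- zipped against "SOS" (objective: alternative decomposition, same O(n) cost).

-- ===== PORT A =====
-- loop body of A; cur_ind stays in {0,1,2}, so sos[cur_ind] never raises and getD's default is unreachable
def pvStepA (st : Int × Int) (char : Char) : Int × Int :=
  let sos := "SOS".toList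
  let res := if ((PySem.List.pyGet? sos st.1).getD 'S') != char then st.2 + 1 else st.2
  let cur := st.1 + 1
  let cur := if cur == (sos.length : Int) then 0 else cur
  (cur, res)

def marsExploration (s : String) : Int :=
  (s.toList.foldl pvStepA (0, 0)).2

-- ===== PORT B =====
-- sum(1 for a, b in zip("SOS", chunk) if a != b)
def pvChunkCount (chunk : List Char) : Int :=
  ("SOS".toList.zip chunk).foldl (fun c (p : Char × Char) => if p.1 != p.2 then c + 1 else c) 0

def marsExploration_alt (s : String) : Int :=
  (PySem.List.pyRange 0 (s.toList.length : Int) 3).foldl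
    (fun total i => total + pvChunkCount (PySem.List.slice s.toList (some i) (some (i + 3)))) 0

-- ===== PRECONDITION & SPEC =====
def Spec_marsExploration (s : String) (out : Int) : Prop := out = marsExploration_alt s
instance (s : String) (out : Int) : Decidable (Spec_marsExploration s out) := by unfold Spec_marsExploration; infer_instance

-- ===== CLAIM (what is proved, stated in full; the proofs are below) =====
def Claim_equal_marsExploration : Prop := ∀ (s : String), Dom_marsExploration s → Spec_marsExploration s (marsExploration s)

-- ===== LEMMAS AND PROOFS =====

-- reference value: the mismatch count, chunked in threes
def pvRef : List Char → Int
  | [] => 0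
  | [a] => pvChunkCount [a]
  | [a, b] => pvChunkCount [a, b]
  | a :: b :: c :: t => pvChunkCount [a, b, c] + pvRef t

lemma pvA_fold (l : List Char) : ∀ res : Int,
    (l.foldl pvStepA (0, res)).2 = res + pvRef l := by
  induction l using pvRef.induct with
  | case1 => intro res; simp [pvRef]
  | case2 a =>
      intro res
      simp [pvStepA, pvRef, pvChunkCount]
      split_ifs <;> omega
  | case3 a b =>
      intro res
      simp [pvStepA, pvRef, pvChunkCount]
      split_ifs <;> omega
  | case4 a b c t ih =>
      intro res
      have h3 : pvStepA (pvStepA (pvStepA (0, res) a) b) c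
          = (0, res + pvChunkCount [a, b, c]) := by
        simp [pvStepA, pvChunkCount]
        split_ifs <;> omega
      show (t.foldl pvStepA (pvStepA (pvStepA (pvStepA (0, res) a) b) c)).2 = _
      rw [h3, ih, pvRef]
      ring

-- pyRange with step 3: nil and cons unfolding
lemma pvRange3_nil (a b : Int) (h : b ≤ a) : PySem.List.pyRange a b 3 = [] := by
  rw [PySem.List.pyRange_of_pos a b (by norm_num)]
  simp [not_lt.2 h]

lemma pvRange3_cons (a b : Int) (h : a < b) :
    PySem.List.pyRange a b 3 = a :: PySem.List.pyRange (a + 3) b 3 := by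
  rw [PySem.List.pyRange_of_pos a b (by norm_num),
      PySem.List.pyRange_of_pos (a + 3) b (by norm_num)]
  have hN : ((b - a + 3 - 1) / 3).toNat
      = (if a + 3 < b then ((b - (a + 3) + 3 - 1) / 3).toNat else 0) + 1 := by
    by_cases h3 : a + 3 < b <;> simp [h3] <;> omega
  rw [if_pos h, hN, List.range_succ_eq_map]
  simp [List.map_map, Function.comp]
  intro k _
  ring

lemma pvB_fold (l : List Char) : ∀ (pre : List Char) (total : Int),
    (PySem.List.pyRange (pre.length : Int) ((pre.length + l.length : Nat) : Int) 3).foldl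
      (fun t i => t + pvChunkCount (PySem.List.slice (pre ++ l) (some i) (some (i + 3)))) total
    = total + pvRef l := by
  induction l using pvRef.induct with
  | case1 =>
      intro pre total
      rw [pvRange3_nil _ _ (by simp)]
      simp [pvRef]
  | case2 a =>
      intro pre total
      rw [pvRange3_cons _ _ (by simp), pvRange3_nil _ _ (by simp)]
      have hsl : PySem.List.slice (pre ++ [a]) (some (pre.length : Int))
          (some ((pre.length : Int) + 3)) = [a] := by
        have := PySem.List.slice_natCast_add (xs := pre ++ [a]) (j := pre.length) (n := 3)
        push_cast at this ⊢
        rw [this]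
        simp
      simp [hsl, pvRef]
  | case3 a b =>
      intro pre total
      rw [pvRange3_cons _ _ (by simp), pvRange3_nil _ _ (by simp)]
      have hsl : PySem.List.slice (pre ++ [a, b]) (some (pre.length : Int))
          (some ((pre.length : Int) + 3)) = [a, b] := by
        have := PySem.List.slice_natCast_add (xs := pre ++ [a, b]) (j := pre.length) (n := 3)
        push_cast at this ⊢
        rw [this]
        simp
      simp [hsl, pvRef]
  | case4 a b c t ih =>
      intro pre total
      rw [pvRange3_cons _ _ (by simp; omega)]
      have hsl : PySem.List.slice (pre ++ (a :: b :: c :: t)) (some (pre.length : Int))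
          (some ((pre.length : Int) + 3)) = [a, b, c] := by
        have := PySem.List.slice_natCast_add (xs := pre ++ (a :: b :: c :: t))
          (j := pre.length) (n := 3)
        push_cast at this ⊢
        rw [this]
        simp
      have hpre : pre ++ (a :: b :: c :: t) = (pre ++ [a, b, c]) ++ t := by simp
      simp only [List.foldl_cons, hsl]
      rw [hpre]
      have harith : ((pre.length : Int) + 3) = (((pre ++ [a, b, c]).length : Nat) : Int) := by
        simp
      have harith2 : ((pre.length + (a :: b :: c :: t).length : Nat) : Int)
        = (((pre ++ [a, b, c]).length + t.length : Nat) : Int) := by simp; omega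
      rw [harith, harith2, ih (pre ++ [a, b, c]) (total + pvChunkCount [a, b, c]), pvRef]
      ring

-- ===== VERDICT (by name: the statement is the Claim_ definition above) =====
theorem marsExploration_spec : Claim_equal_marsExploration := by
  intro s _
  show marsExploration s = marsExploration_alt s
  have hA : marsExploration s = 0 + pvRef s.toList := pvA_fold s.toList 0
  have hB := pvB_fold s.toList [] 0
  simp only [List.length_nil, List.nil_append, Nat.zero_add, Nat.cast_zero] at hB
  unfold marsExploration_alt
  rw [hA, ← hB]
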